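-- pv_equiv track=rewrite | github.com/dnorum/kryptos | double_autokey_extend/double_autokey_extend.py | extractMiddles
-- ===== SOURCE A (Python) =====
-- def extractMiddles(dictionary):
-- 	middles = set()
-- 	for word in dictionary:
-- 		for i in range(0, len(word)):
-- 			ending = word[-(i+1):]
-- 			for j in range(0, len(ending)):
-- 				middles.add(ending[0:(j+1)])
-- 	return middles
-- ===== SOURCE B (Python) =====
-- def extractMiddles(dictionary):
-- 	middles = set()
-- 	for word in dictionary:
-- 		for start in range(len(word) - 1, -1, -1):
-- 			sub = ""
-- 			for ch in word[start:]:
-- 				sub += ch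
-- 				middles.add(sub)
-- 	return middles
-- ===== Notes on version B (the rewrite author's own statement) =====
-- stated objective: simpler
-- what changed: B drops A's suffix-then-prefix double slicing (word[-(i+1):] then ending[0:j+1]) and instead walks each start index and builds every substring incrementally one character at a time, with no slicing in the inner loop.
import Mathlib
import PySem

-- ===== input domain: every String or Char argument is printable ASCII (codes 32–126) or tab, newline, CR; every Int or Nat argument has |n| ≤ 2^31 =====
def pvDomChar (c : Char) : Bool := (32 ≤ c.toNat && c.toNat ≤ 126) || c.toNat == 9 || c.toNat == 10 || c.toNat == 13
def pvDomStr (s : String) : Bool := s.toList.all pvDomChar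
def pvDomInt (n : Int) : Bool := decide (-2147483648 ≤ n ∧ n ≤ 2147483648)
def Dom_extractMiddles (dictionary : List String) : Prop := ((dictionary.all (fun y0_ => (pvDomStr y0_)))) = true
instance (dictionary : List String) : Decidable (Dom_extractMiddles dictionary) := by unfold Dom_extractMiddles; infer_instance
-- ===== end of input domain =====

-- B replaces A's suffix-then-prefix double slicing by building each substring incrementally,
-- one character at a time, with no inner slicing (objective: simpler).

-- ===== PORT A =====
def extractMiddles (dictionary : List String) : List String :=
  dictionary.foldl (fun middles word =>
    (PySem.List.pyRange 0 (PySem.Str.len word) 1).foldl (fun middles i =>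
      let ending := PySem.Str.slice word (some (-(i+1))) none
      (PySem.List.pyRange 0 (PySem.Str.len ending) 1).foldl (fun middles j =>
        PySem.Set.add middles (PySem.Str.slice ending (some 0) (some (j+1)))) middles) middles)
    PySem.Set.empty

-- ===== PORT B =====
-- 'sub += ch' is ported with sub kept as a List Char and converted by String.ofList at the add.
def extractMiddles_alt (dictionary : List String) : List String :=
  dictionary.foldl (fun middles word =>
    (PySem.List.pyRange (PySem.Str.len word - 1) (-1) (-1)).foldl (fun middles start =>
      ((PySem.Str.slice word (some start) none).toList.foldl
        (fun (st : List Char × PySem.Set String) ch =>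
          let sub := st.1 ++ [ch]
          (sub, PySem.Set.add st.2 (String.ofList sub)))
        ([], middles)).2) middles)
    PySem.Set.empty

-- ===== PRECONDITION & SPEC =====
def Spec_extractMiddles (dictionary : List String) (out : List String) : Prop := out = extractMiddles_alt dictionary
instance (dictionary : List String) (out : List String) : Decidable (Spec_extractMiddles dictionary out) := by unfold Spec_extractMiddles; infer_instance

-- ===== CLAIM (what is proved, stated in full; the proofs are below) =====
def Claim_equal_extractMiddles : Prop := ∀ (dictionary : List String), Dom_extractMiddles dictionary → Spec_extractMiddles dictionary (extractMiddles dictionary)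

-- ===== LEMMAS AND PROOFS =====

-- add all non-empty prefixes of l (as strings) to the set, shortest first
def pvPrefFold (m : PySem.Set String) (l : List Char) : PySem.Set String :=
  (List.range l.length).foldl (fun m j => PySem.Set.add m (String.ofList (l.take (j+1)))) m

-- canonical per-word accumulation: suffixes from the shortest, prefixes of each
def pvWordCanon (m : PySem.Set String) (cs : List Char) : PySem.Set String :=
  (List.range cs.length).foldl (fun m k => pvPrefFold m (cs.drop (cs.length - 1 - k))) m

theorem pvA_inner (e : String) (m : PySem.Set String) :
    (PySem.List.pyRange 0 (PySem.Str.len e) 1).foldl (fun m j =>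
      PySem.Set.add m (PySem.Str.slice e (some 0) (some (j+1)))) m
    = pvPrefFold m e.toList := by
  rw [PySem.Str.len_eq, PySem.List.pyRange_one, List.foldl_map]
  unfold pvPrefFold
  simp only [Int.sub_zero, Int.toNat_natCast]
  apply PySem.List.foldl_congr_mem
  intro acc j _
  congr 1
  rw [← String.ofList_toList (s := PySem.Str.slice e (some 0) (some (0 + (j:Int) + 1)))]
  congr 1
  rw [PySem.Str.toList_slice]
  simp only [PySem.Chars.slice_eq_listSlice]
  rw [PySem.List.slice_zero_start]
  rw [show (0:Int) + (j:Int) + 1 = (((j+1 : Nat)) : Int) by push_cast; ring]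
  rw [PySem.List.slice_to_natCast]

theorem pvA_word (w : String) (m : PySem.Set String) :
    (PySem.List.pyRange 0 (PySem.Str.len w) 1).foldl (fun middles i =>
      let ending := PySem.Str.slice w (some (-(i+1))) none
      (PySem.List.pyRange 0 (PySem.Str.len ending) 1).foldl (fun middles j =>
        PySem.Set.add middles (PySem.Str.slice ending (some 0) (some (j+1)))) middles) m
    = pvWordCanon m w.toList := by
  rw [PySem.Str.len_eq, PySem.List.pyRange_one, List.foldl_map]
  unfold pvWordCanon
  simp only [Int.sub_zero, Int.toNat_natCast]
  apply PySem.List.foldl_congr_mem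
  intro acc k hk
  rw [pvA_inner]
  congr 1
  rw [PySem.Str.toList_slice]
  simp only [PySem.Chars.slice_eq_listSlice]
  have h1 : -((0:Int) + (k:Int) + 1) = -(((k+1 : Nat)) : Int) := by push_cast; ring
  rw [h1, PySem.List.slice_from_neg_natCast _ _ (Nat.succ_pos k)]
  congr 1
  omega

theorem pvB_chars (l : List Char) (sub : List Char) (m : PySem.Set String) :
    (l.foldl (fun (st : List Char × PySem.Set String) ch =>
        let s' := st.1 ++ [ch]
        (s', PySem.Set.add st.2 (String.ofList s'))) (sub, m)).2
    = (List.range l.length).foldl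
        (fun m j => PySem.Set.add m (String.ofList (sub ++ l.take (j+1)))) m := by
  induction l generalizing sub m with
  | nil => simp
  | cons c t ih =>
    simp only [List.foldl_cons, List.length_cons, List.range_succ_eq_map, List.foldl_cons,
      List.foldl_map]
    rw [ih]
    simp only [List.take_succ_cons, List.take_zero]
    apply PySem.List.foldl_congr_mem
    intro acc j _
    congr 2
    simp

theorem pvB_word (w : String) (m : PySem.Set String) :
    (PySem.List.pyRange (PySem.Str.len w - 1) (-1) (-1)).foldl (fun middles start =>
      ((PySem.Str.slice w (some start) none).toList.foldl
        (fun (st : List Char × PySem.Set String) ch =>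
          let sub := st.1 ++ [ch]
          (sub, PySem.Set.add st.2 (String.ofList sub)))
        ([], middles)).2) m
    = pvWordCanon m w.toList := by
  rw [PySem.Str.len_eq, PySem.List.pyRange_neg_one, List.foldl_map]
  unfold pvWordCanon
  have hn : ((w.toList.length : Int) - 1 - (-1)).toNat = w.toList.length := by omega
  rw [hn]
  apply PySem.List.foldl_congr_mem
  intro acc k hk
  rw [List.mem_range] at hk
  rw [pvB_chars]
  have hs : (w.toList.length : Int) - 1 - (k:Int) = ((w.toList.length - 1 - k : Nat) : Int) := by
    omega
  rw [hs, show (PySem.Str.slice w (some ((w.toList.length - 1 - k : Nat) : Int)) none).toList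
      = w.toList.drop (w.toList.length - 1 - k) by
    rw [PySem.Str.toList_slice]
    simp only [PySem.Chars.slice_eq_listSlice]
    exact PySem.List.slice_from_natCast _ _]
  unfold pvPrefFold
  simp

-- ===== VERDICT (by name: the statement is the Claim_ definition above) =====
theorem extractMiddles_spec : Claim_equal_extractMiddles := by
  intro dictionary _
  unfold Spec_extractMiddles extractMiddles extractMiddles_alt
  apply PySem.List.foldl_congr_mem
  intro acc w _
  rw [pvA_word, pvB_word]
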